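-- pv_equiv track=rewrite | github.com/ronniegane/Project-Euler | Euler_0523 First Sort 1.py | sortTime
-- ===== SOURCE A (Python) =====
-- stepDict = {} # working with dictionaries, the keys need to be a hashable type.
--
-- def sortTime(myList):
--     '''Returns the time taken to sort the given list'''
--     steps = 0
--     index = 0
--     # make sure myList is a list
--     myList = tuple(myList)
--     listCopy = myList
--     maxIndex = len(myList)
--
--     while index < maxIndex-1:
--         # if we have seen this permutation before, use the dictionary value
--         if myList in stepDict:
--             steps += stepDict[myList]
--             break
--         elif myList[index] <= myList[index+1]:
--             # in order, just move along
--             index += 1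
--         else:
--             # move smaller number (index+1) to front of list
--             myList = (myList[index+1],)+myList[0:index+1]+myList[index+2:maxIndex]
--
--             # Start from first position again
--             index = 0
--             # Add to the count of steps
--             steps += 1
--     # add this permutation to the dictionary
--     stepDict[listCopy] = steps
--     return steps
-- ===== SOURCE B (Python) =====
-- def sortTime(myList):
--     '''Returns the time taken to sort the given list'''
--     total = 0
--     seen = []  # sorted list of the elements processed so far
--     for x in myList:
--         if seen and x < seen[-1]:
--             total += _stepsFor(seen, x)
--         seen = _insort(seen, x)
--     return total
--
-- def _stepsFor(seen, x):
--     # product of (1 + multiplicity) over the distinct values of `seen` below x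
--     prod = 1
--     i = 0
--     while i < len(seen) and seen[i] < x:
--         j = i
--         while j < len(seen) and seen[j] == seen[i]:
--             j += 1
--         prod *= 1 + (j - i)
--         i = j
--     return prod
--
-- def _insort(seen, x):
--     i = 0
--     while i < len(seen) and seen[i] < x:
--         i += 1
--     return seen[:i] + [x] + seen[i:]
-- ===== Notes on version B (the rewrite author's own statement) =====
-- stated objective: faster
-- what changed: A simulates every single move-to-front step, rescanning from index 0 after each of its (worst-case exponentially many) moves; B never simulates: it makes one pass, keeping a sorted list of the elements seen so far, and adds for each out-of-order element its total step cost in closed form (the product of 1+multiplicity over the distinct smaller values already seen).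
import Mathlib
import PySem

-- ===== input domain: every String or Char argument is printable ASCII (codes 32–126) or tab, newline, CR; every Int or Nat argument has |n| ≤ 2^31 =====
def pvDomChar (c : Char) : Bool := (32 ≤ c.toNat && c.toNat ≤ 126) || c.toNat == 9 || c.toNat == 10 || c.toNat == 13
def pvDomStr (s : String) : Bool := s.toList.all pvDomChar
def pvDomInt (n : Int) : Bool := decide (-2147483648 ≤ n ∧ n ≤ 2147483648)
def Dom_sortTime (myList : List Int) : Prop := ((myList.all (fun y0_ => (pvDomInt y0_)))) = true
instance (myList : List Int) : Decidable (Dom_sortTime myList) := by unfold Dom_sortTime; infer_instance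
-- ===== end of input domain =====

-- B replaces A's exponential-time rescan-from-zero simulation by a per-element product
-- formula (one insertion into a sorted list per element); equality of RETURN values is
-- proved — A also fills a module-level memo dict (a side effect that never changes its
-- return value), which B does not reproduce.

-- ===== PORT A =====
-- the module-level memo dict `stepDict`; at interpreter start it is empty, and entries
-- added by earlier calls never change the value returned (they cache exact step counts),
-- so the port models the dict in its initial (empty) state
def stepDictA : PySem.Dict (List Int) Int := PySem.Dict.empty

-- the `while index < maxIndex-1` loop of A, one fuel unit per iteration; the fuel
-- `pvFuel` below is proved sufficient (the loop of A always terminates), so the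
-- `none` (out-of-fuel) branch is never taken on any input
def loopA : Nat → List Int → Nat → Int → Option Int
  | 0, _, _, _ => none
  | fuel+1, L, index, steps =>
    if index < L.length - 1 then
      match PySem.Dict.get? stepDictA L with
      | some v => some (steps + v)   -- `steps += stepDict[myList]; break` (unreachable: the dict is empty)
      | none =>
        if PySem.List.pyGetD L (index : Int) 0 ≤ PySem.List.pyGetD L ((index : Int) + 1) 0 then
          loopA fuel L (index + 1) steps
        else
          loopA fuel
            (PySem.List.pyGetD L ((index : Int) + 1) 0 ::
              (PySem.List.slice L (some 0) (some ((index : Int) + 1)) ++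
               PySem.List.slice L (some ((index : Int) + 2)) (some (L.length : Int))))
            0 (steps + 1)
    else some steps

-- generous upper bound on the number of loop iterations, proved sufficient below
def pvFuel (myList : List Int) : Nat :=
  (2 * myList.length * 2 ^ myList.length + myList.length + 1) * (myList.length + 1) + 2

def sortTime (myList : List Int) : Int := (loopA (pvFuel myList) myList 0 0).getD 0

-- ===== PORT B =====
-- insert x into the sorted list `seen` (Source B's `_insort`)
def pvInsort (seen : List Int) (x : Int) : List Int :=
  match seen with
  | [] => [x]
  | a :: t => if a < x then a :: pvInsort t x else x :: a :: t

-- product of (1 + multiplicity) over the distinct values of sorted `seen` below x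
-- (Source B's `_stepsFor`; the inner equal-run while loop is the takeWhile/dropWhile split)
def pvStepsFor (seen : List Int) (x : Int) : Int :=
  match seen with
  | [] => 1
  | v :: t =>
    if v < x then
      (2 + ((t.takeWhile (fun a => a == v)).length : Int)) *
        pvStepsFor (t.dropWhile (fun a => a == v)) x
    else 1
termination_by seen.length
decreasing_by
  simp only [List.length_cons]
  exact Nat.lt_succ_of_le (List.length_dropWhile_le _ _)

-- the `for x in myList` loop of Source B
def pvGo : List Int → List Int → Int → Int
  | [], _, total => total
  | x :: r, seen, total =>
    pvGo r (pvInsort seen x)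
      (match seen.getLast? with
       | some l => if x < l then total + pvStepsFor seen x else total
       | none => total)

def sortTime_alt (myList : List Int) : Int := pvGo myList [] 0

-- ===== PRECONDITION & SPEC =====
def Spec_sortTime (myList : List Int) (out : Int) : Prop := out = sortTime_alt myList
instance (myList : List Int) (out : Int) : Decidable (Spec_sortTime myList out) := by unfold Spec_sortTime; infer_instance

-- ===== CLAIM (what is proved, stated in full; the proofs are below) =====
def Claim_equal_sortTime : Prop := ∀ (myList : List Int), Dom_sortTime myList → Spec_sortTime myList (sortTime myList)

-- ===== LEMMAS AND PROOFS =====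

-- Nat-valued twin of pvStepsFor, convenient for fuel arithmetic
def cvN (S : List Int) (x : Int) : Nat :=
  match S with
  | [] => 1
  | v :: t =>
    if v < x then
      (2 + (t.takeWhile (fun a => a == v)).length) * cvN (t.dropWhile (fun a => a == v)) x
    else 1
termination_by S.length
decreasing_by
  simp only [List.length_cons]
  exact Nat.lt_succ_of_le (List.length_dropWhile_le _ _)

-- number of moves performed while carrying y across the sorted block V (c-values read in T)
def mval (T : List Int) (y : Int) (V : List Int) : Nat :=
  ((V.filter (fun v => v < y)).map (cvN T)).sum

theorem pvStepsFor_eq_cvN (S : List Int) (x : Int) : pvStepsFor S x = (cvN S x : Int) := by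
  fun_induction pvStepsFor S x with
  | case1 => simp [cvN]
  | case2 v t h ih =>
    rw [cvN, if_pos h, ih]
    push_cast
    ring
  | case3 v t h => rw [cvN, if_neg h]; rfl

@[simp] theorem get?_stepDictA (L : List Int) : PySem.Dict.get? stepDictA L = none := by
  rfl

theorem loopA_exit (f : Nat) (L : List Int) (i : Nat) (s : Int) (h : ¬ i < L.length - 1) :
    loopA (f + 1) L i s = some s := by
  simp [loopA, h]

theorem pyGetD_nat_succ (L : List Int) (i : Nat) :
    PySem.List.pyGetD L ((i : Int) + 1) 0 = L.getD (i + 1) 0 := by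
  have : ((i : Int) + 1) = ((i + 1 : Nat) : Int) := by push_cast; ring
  rw [this, PySem.List.pyGetD_natCast]

theorem loopA_adv (f : Nat) (L : List Int) (i : Nat) (s : Int) (h : i < L.length - 1)
    (hle : L.getD i 0 ≤ L.getD (i + 1) 0) :
    loopA (f + 1) L i s = loopA f L (i + 1) s := by
  have hc : PySem.List.pyGetD L (i : Int) 0 ≤ PySem.List.pyGetD L ((i : Int) + 1) 0 := by
    rw [PySem.List.pyGetD_natCast, pyGetD_nat_succ]; exact hle
  simp only [loopA, get?_stepDictA]
  rw [if_pos h, if_pos hc]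

theorem loopA_move (f : Nat) (L : List Int) (i : Nat) (s : Int) (h : i < L.length - 1)
    (hgt : ¬ L.getD i 0 ≤ L.getD (i + 1) 0) :
    loopA (f + 1) L i s = loopA f (L.getD (i + 1) 0 :: (L.take (i + 1) ++ L.drop (i + 2))) 0 (s + 1) := by
  have hsl1 : PySem.List.slice L (some 0) (some ((i : Int) + 1)) = L.take (i + 1) := by
    have : ((i : Int) + 1) = ((i + 1 : Nat) : Int) := by push_cast; ring
    rw [this, PySem.List.slice_zero_start, PySem.List.slice_to_natCast]
  have hsl2 : PySem.List.slice L (some ((i : Int) + 2)) (some (L.length : Int)) = L.drop (i + 2) := by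
    have h2 : ((i : Int) + 2) = ((i + 2 : Nat) : Int) := by push_cast; ring
    rw [h2, PySem.List.slice_natCast]
    exact List.take_of_length_le (by simp)
  have hc : ¬ PySem.List.pyGetD L (i : Int) 0 ≤ PySem.List.pyGetD L ((i : Int) + 1) 0 := by
    rw [PySem.List.pyGetD_natCast, pyGetD_nat_succ]; exact hgt
  simp only [loopA, get?_stepDictA]
  rw [if_pos h, if_neg hc, hsl1, hsl2, pyGetD_nat_succ]

-- a sorted segment is scanned without moves
theorem loopA_scan (d : Nat) : ∀ (L : List Int) (i : Nat), i + d + 1 ≤ L.length →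
    (∀ m, i ≤ m → m < i + d → L.getD m 0 ≤ L.getD (m + 1) 0) →
    ∀ f s, loopA (f + d) L i s = loopA f L (i + d) s := by
  induction d with
  | zero => intro L i _ _ f s; rfl
  | succ d ih =>
    intro L i hlen hmono f s
    have hstep : loopA (f + (d + 1)) L i s = loopA (f + d) L (i + 1) s := by
      have : f + (d + 1) = (f + d) + 1 := by ring
      rw [this, loopA_adv _ _ _ _ (by omega) (hmono i le_rfl (by omega))]
    rw [hstep, ih L (i + 1) (by omega) (fun m hm hm' => hmono m (by omega) (by omega)) f s]
    congr 1
    omega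

theorem sorted_getD (L : List Int) (hL : L.Pairwise (· ≤ ·)) (m : Nat) (h : m + 1 < L.length) :
    L.getD m 0 ≤ L.getD (m + 1) 0 := by
  rw [List.getD_eq_getElem L 0 (by omega), List.getD_eq_getElem L 0 h]
  exact List.pairwise_iff_getElem.mp hL m (m + 1) (by omega) h (by omega)

theorem pvInsort_perm (S : List Int) (x : Int) : (pvInsort S x).Perm (x :: S) := by
  induction S with
  | nil => rfl
  | cons a t ih =>
    by_cases h : a < x
    · simpa [pvInsort, h] using ((ih.cons a).trans (List.Perm.swap x a t))
    · simp [pvInsort, h]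

theorem pvInsort_length (S : List Int) (x : Int) : (pvInsort S x).length = S.length + 1 := by
  simpa using (pvInsort_perm S x).length_eq

theorem mem_pvInsort (S : List Int) (x u : Int) : u ∈ pvInsort S x ↔ u = x ∨ u ∈ S := by
  rw [(pvInsort_perm S x).mem_iff]; simp

theorem pvInsort_sorted (S : List Int) (x : Int) (hS : S.Pairwise (· ≤ ·)) :
    (pvInsort S x).Pairwise (· ≤ ·) := by
  induction S with
  | nil => simp [pvInsort]
  | cons a t ih =>
    rw [List.pairwise_cons] at hS
    by_cases h : a < x
    · rw [pvInsort, if_pos h, List.pairwise_cons]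
      refine ⟨fun b hb => ?_, ih hS.2⟩
      rcases (mem_pvInsort t x b).mp hb with rfl | hb
      · exact le_of_lt h
      · exact hS.1 b hb
    · rw [pvInsort, if_neg h, List.pairwise_cons]
      refine ⟨fun b hb => ?_, List.pairwise_cons.mpr hS⟩
      rcases List.mem_cons.mp hb with rfl | hb
      · exact le_of_not_gt h
      · exact le_trans (le_of_not_gt h) (hS.1 b hb)

theorem all_eq_cons_eq_append (P : List Int) (y : Int) (h : ∀ q ∈ P, q = y) :
    y :: P = P ++ [y] := by
  induction P with
  | nil => rfl
  | cons q P' ih =>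
    have hq : q = y := h q List.mem_cons_self
    subst hq
    have := ih (fun q hq => h q (List.mem_cons_of_mem _ hq))
    simpa using congrArg (q :: ·) this

-- inserting y into P ++ V when P ≤ y ≤ V lands between them
theorem pvInsort_middle (P V : List Int) (y : Int) (hP : P.Pairwise (· ≤ ·))
    (hPy : ∀ p ∈ P, p ≤ y) (hyV : ∀ v ∈ V, y ≤ v) :
    pvInsort (P ++ V) y = P ++ y :: V := by
  induction P with
  | nil =>
    cases V with
    | nil => rfl
    | cons v V' =>
      have : ¬ v < y := not_lt.mpr (hyV v List.mem_cons_self)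
      simp [pvInsort, this]
  | cons p P' ih =>
    rw [List.pairwise_cons] at hP
    by_cases h : p < y
    · rw [List.cons_append, pvInsort, if_pos h,
        ih hP.2 (fun q hq => hPy q (List.mem_cons_of_mem _ hq))]
      rfl
    · have hpy : p = y := le_antisymm (hPy p List.mem_cons_self) (le_of_not_gt h)
      have hall : ∀ q ∈ p :: P', q = y := by
        intro q hq
        rcases List.mem_cons.mp hq with rfl | hq
        · exact hpy
        · exact le_antisymm (hPy q (List.mem_cons_of_mem _ hq)) (hpy ▸ hP.1 q hq)
      rw [List.cons_append, pvInsort, if_neg h]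
      calc y :: p :: (P' ++ V) = (y :: (p :: P')) ++ V := by simp
        _ = ((p :: P') ++ [y]) ++ V := by rw [all_eq_cons_eq_append _ _ hall]
        _ = p :: (P' ++ y :: V) := by simp

theorem takeWhile_append_of_not (q : Int → Bool) (l V : List Int) (hV : ∀ u ∈ V, ¬ q u) :
    (l ++ V).takeWhile q = l.takeWhile q ∧ (l ++ V).dropWhile q = l.dropWhile q ++ V := by
  induction l with
  | nil =>
    cases V with
    | nil => exact ⟨rfl, rfl⟩
    | cons v V' =>
      have : ¬ q v := hV v List.mem_cons_self
      simp [List.dropWhile_cons, this]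
  | cons a l' ih =>
    by_cases h : q a
    · simp [List.takeWhile_cons, h, ih.1, ih.2]
    · simp [List.takeWhile_cons, h]

-- appending elements ≥ v does not change cvN at v
theorem cvN_append_of_ge (P V : List Int) (v : Int) (hV : ∀ u ∈ V, v ≤ u) :
    cvN (P ++ V) v = cvN P v := by
  fun_induction cvN P v with
  | case1 =>
    rw [List.nil_append]
    cases V with
    | nil => rw [cvN]
    | cons u V' =>
      have : ¬ u < v := not_lt.mpr (hV u List.mem_cons_self)
      rw [cvN, if_neg this]
  | case2 p t h ih =>
    have hVne : ∀ u ∈ V, ¬ ((fun a => a == p) u) := by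
      intro u hu
      simp only [beq_iff_eq]
      exact fun he => absurd (he ▸ hV u hu) (not_le.mpr h)
    have htw := takeWhile_append_of_not (fun a => a == p) t V hVne
    rw [List.cons_append, cvN.eq_def]
    simp only [if_pos h, htw.1, htw.2, ih]
  | case3 p t h =>
    rw [List.cons_append, cvN.eq_def]
    simp only [if_neg h]

theorem two_add_le_two_pow (a : Nat) : 2 + a ≤ 2 ^ (a + 1) := by
  induction a with
  | zero => simp
  | succ a ih =>
    have : (1:Nat) ≤ 2 ^ (a + 1) := Nat.one_le_two_pow
    calc 2 + (a + 1) = (2 + a) + 1 := by ring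
      _ ≤ 2 ^ (a + 1) + 2 ^ (a + 1) := by omega
      _ = 2 ^ (a + 2) := by ring

theorem cvN_le_two_pow (S : List Int) (x : Int) : cvN S x ≤ 2 ^ S.length := by
  fun_induction cvN S x with
  | case1 => simp
  | case2 v t h ih =>
    have hlen : (t.takeWhile (fun a => a == v)).length + (t.dropWhile (fun a => a == v)).length
        = t.length := by
      rw [← List.length_append, List.takeWhile_append_dropWhile]
    calc (2 + (t.takeWhile (fun a => a == v)).length) * cvN (t.dropWhile (fun a => a == v)) x
        ≤ 2 ^ ((t.takeWhile (fun a => a == v)).length + 1) * 2 ^ (t.dropWhile (fun a => a == v)).length :=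
          Nat.mul_le_mul (two_add_le_two_pow _) ih
      _ = 2 ^ ((t.takeWhile (fun a => a == v)).length + 1 + (t.dropWhile (fun a => a == v)).length) := by
          rw [← pow_add]
      _ ≤ 2 ^ (v :: t).length := by
          apply Nat.pow_le_pow_right (by norm_num)
          simp only [List.length_cons]
          omega
  | case3 v t h =>
    exact Nat.one_le_two_pow

theorem sorted_gt_of_mem_dropWhile (t : List Int) (v : Int) (ht : t.Pairwise (· ≤ ·))
    (hge : ∀ u ∈ t, v ≤ u) : ∀ u ∈ t.dropWhile (fun a => a == v), v < u := by
  induction t with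
  | nil => simp
  | cons a t' ih =>
    rw [List.pairwise_cons] at ht
    by_cases h : (a == v) = true
    · rw [List.dropWhile_cons]
      simp only [h, if_true]
      exact ih ht.2 (fun u hu => hge u (List.mem_cons_of_mem _ hu))
    · rw [List.dropWhile_cons]
      simp only [h, if_false]
      have hva : v < a := lt_of_le_of_ne (hge a List.mem_cons_self)
        (fun he => h (by simp [he.symm]))
      intro u hu
      rcases List.mem_cons.mp hu with rfl | hu
      · exact hva
      · exact lt_of_lt_of_le hva (ht.1 u hu)

theorem nat_sum_map_mul (c : Nat) (f : Int → Nat) (l : List Int) :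
    (l.map (fun u => c * f u)).sum = c * (l.map f).sum := by
  induction l with
  | nil => simp
  | cons a l ih => simp [ih, Nat.mul_add]

-- fundamental identity: 1 + sum of c-values below b = product formula at b
theorem one_add_mval_aux (n : Nat) : ∀ (S : List Int) (b : Int), S.length ≤ n →
    S.Pairwise (· ≤ ·) → 1 + mval S b S = cvN S b := by
  induction n with
  | zero =>
    intro S b hlen _
    have : S = [] := List.eq_nil_of_length_eq_zero (by omega)
    subst this
    simp [mval, cvN]
  | succ n ih =>
    intro S b hlen hS
    cases S with
    | nil => simp [mval, cvN]
    | cons v t =>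
      rw [List.pairwise_cons] at hS
      set w := t.takeWhile (fun a => a == v) with hw
      set T := t.dropWhile (fun a => a == v) with hT
      have htsplit : w ++ T = t := List.takeWhile_append_dropWhile
      have hwv : ∀ u ∈ w, u = v := by
        intro u hu
        simpa using List.mem_takeWhile_imp hu
      have hTgt : ∀ u ∈ T, v < u := sorted_gt_of_mem_dropWhile t v hS.2 hS.1
      have hTsorted : T.Pairwise (· ≤ ·) := List.Pairwise.sublist (List.dropWhile_sublist _) hS.2
      have hTlen : T.length ≤ n := by
        have h1 : T.length ≤ t.length := List.length_dropWhile_le _ _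
        simp only [List.length_cons] at hlen
        omega
      by_cases hb : v < b
      · -- filter (v::t) (· < b) = v :: w ++ T.filter
        have hfil : (v :: t).filter (fun u => decide (u < b)) =
            v :: (w ++ T.filter (fun u => decide (u < b))) := by
          rw [List.filter_cons_of_pos (by simpa using hb), ← htsplit, List.filter_append]
          congr 2
          exact List.filter_eq_self.mpr (fun u hu => by simpa using (hwv u hu) ▸ hb)
        have hcvv : cvN (v :: t) v = 1 := by rw [cvN]; simp
        have hcvu : ∀ u ∈ T.filter (fun u => decide (u < b)),
            cvN (v :: t) u = (2 + w.length) * cvN T u := by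
          intro u hu
          have : v < u := hTgt u (List.mem_of_mem_filter hu)
          rw [cvN, if_pos this]
        have hwrep : w = List.replicate w.length v := List.eq_replicate_of_mem hwv
        have hsum : mval (v :: t) b (v :: t) = 1 + w.length +
            (2 + w.length) * ((T.filter (fun u => decide (u < b))).map (cvN T)).sum := by
          rw [mval]
          rw [show (v :: t).filter (fun v_1 => decide (v_1 < b)) =
              v :: (w ++ T.filter (fun u => decide (u < b))) from hfil]
          rw [List.map_cons, List.sum_cons, List.map_append, List.sum_append, hcvv]
          rw [List.map_congr_left hcvu, nat_sum_map_mul]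
          have : (w.map (cvN (v :: t))).sum = w.length := by
            conv_lhs => rw [hwrep]
            simp [List.map_replicate, hcvv]
          rw [this]
          ring
        have hTmain : 1 + mval T b T = cvN T b := ih T b hTlen hTsorted
        rw [hsum, cvN, if_pos hb]
        rw [← hTmain, mval]
        ring
      · have hfil : (v :: t).filter (fun u => decide (u < b)) = [] := by
          apply List.filter_eq_nil_iff.mpr
          intro u hu
          rcases List.mem_cons.mp hu with rfl | hu
          · simpa using hb
          · have : b ≤ u := le_trans (not_lt.mp hb) (hS.1 u hu)
            simpa using not_lt.mpr this
        rw [mval, hfil, cvN, if_neg hb]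
        simp

theorem one_add_mval_self (S : List Int) (b : Int) (hS : S.Pairwise (· ≤ ·)) :
    1 + mval S b S = cvN S b := one_add_mval_aux S.length S b le_rfl hS

theorem pvGo_acc (r : List Int) : ∀ (S : List Int) (t : Int), pvGo r S t = t + pvGo r S 0 := by
  induction r with
  | nil => intro S t; simp [pvGo]
  | cons x r' ih =>
    intro S t
    rw [pvGo, pvGo]
    cases hS : S.getLast? with
    | none => exact ih _ t
    | some l =>
      by_cases hx : x < l
      · simp only [hx, if_pos]
        rw [ih _ (t + pvStepsFor S x), ih _ (0 + pvStepsFor S x)]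
        ring
      · simp only [hx, ite_false]
        exact ih _ t

-- scanning a sorted prefix Q from i to j does nothing but advance the index
theorem loopA_scanPrefix (Q rest : List Int) (i j : Nat) (hQ : Q.Pairwise (· ≤ ·))
    (hij : i ≤ j) (hj : j + 1 ≤ Q.length) :
    ∀ f s, loopA (f + (j - i)) (Q ++ rest) i s = loopA f (Q ++ rest) j s := by
  intro f s
  have hlen : i + (j - i) + 1 ≤ (Q ++ rest).length := by
    simp only [List.length_append]; omega
  have hmono : ∀ m, i ≤ m → m < i + (j - i) →
      (Q ++ rest).getD m 0 ≤ (Q ++ rest).getD (m + 1) 0 := by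
    intro m _ hm
    rw [List.getD_append _ _ _ _ (by omega), List.getD_append _ _ _ _ (by omega)]
    exact sorted_getD Q hQ m (by omega)
  have := loopA_scan (j - i) (Q ++ rest) i hlen hmono f s
  rwa [show i + (j - i) = j by omega] at this

-- the cascade lemma: carrying y across the sorted block V inserts it, at mval moves
theorem lem2 (N : Nat) : ∀ (P V : List Int) (y : Int) (R : List Int) (i : Nat),
    (P.length + V.length) * (P.length + V.length + 1) + V.length ≤ N →
    P.Pairwise (· ≤ ·) → V.Pairwise (· ≤ ·) →
    (∀ p ∈ P, p ≤ y) → (∀ p ∈ P, ∀ v ∈ V, p ≤ v) → i ≤ P.length →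
    ∃ k : Nat, k ≤ (2 * mval (P ++ V) y V + 1) * ((P ++ y :: (V ++ R)).length + 1) ∧
      ∀ (f : Nat) (s : Int),
        loopA (f + k) (P ++ y :: (V ++ R)) i s
          = loopA f (pvInsort (P ++ V) y ++ R) (P.length + V.length) (s + (mval (P ++ V) y V : Int)) := by
  induction N using Nat.strong_induction_on with
  | _ N ihN =>
  intro P V y R i hN hP hV hPy hPV hi
  have hPy' : (P ++ [y]).Pairwise (· ≤ ·) := by
    rw [List.pairwise_append]
    exact ⟨hP, List.pairwise_singleton _ _, fun p hp z hz => by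
      rw [List.mem_singleton] at hz; exact hz ▸ hPy p hp⟩
  cases V with
  | nil =>
    have hins : pvInsort (P ++ []) y = P ++ [y] := by
      simpa using pvInsort_middle P [] y hP hPy (by simp)
    have hm0 : mval (P ++ []) y [] = 0 := by simp [mval]
    refine ⟨P.length - i, ?_, ?_⟩
    · have : (P ++ y :: ([] ++ R)).length = P.length + 1 + R.length := by
        simp only [List.length_append, List.length_cons, List.length_nil, List.nil_append, List.append_nil]; omega
      simp only [hm0]
      omega
    · intro f s
      have := loopA_scanPrefix (P ++ [y]) R i P.length hPy' hi (by simp) f s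
      rw [hm0, hins]
      simpa using this
  | cons v V' =>
    rw [List.pairwise_cons] at hV
    by_cases hyv : y ≤ v
    · -- y is already in place: pure scan, no moves
      have hQ : (P ++ y :: v :: V').Pairwise (· ≤ ·) := by
        rw [List.pairwise_append]
        refine ⟨hP, ?_, ?_⟩
        · rw [List.pairwise_cons]
          refine ⟨fun u hu => ?_, List.pairwise_cons.mpr hV⟩
          rcases List.mem_cons.mp hu with rfl | hu
          · exact hyv
          · exact le_trans hyv (hV.1 u hu)
        · intro p hp z hz
          rcases List.mem_cons.mp hz with rfl | hz
          · exact hPy p hp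
          · exact hPV p hp z hz
      have hm0 : mval (P ++ v :: V') y (v :: V') = 0 := by
        rw [mval]
        have : (v :: V').filter (fun u => decide (u < y)) = [] := by
          apply List.filter_eq_nil_iff.mpr
          intro u hu
          rcases List.mem_cons.mp hu with rfl | hu
          · simpa using not_lt.mpr hyv
          · simpa using not_lt.mpr (le_trans hyv (hV.1 u hu))
        rw [this]; rfl
      have hins : pvInsort (P ++ v :: V') y = P ++ y :: v :: V' := by
        apply pvInsort_middle P (v :: V') y hP hPy
        intro u hu
        rcases List.mem_cons.mp hu with rfl | hu
        · exact hyv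
        · exact le_trans hyv (hV.1 u hu)
      refine ⟨P.length + (v :: V').length - i, ?_, ?_⟩
      · have : (P ++ y :: (v :: V' ++ R)).length = P.length + V'.length + R.length + 2 := by
          simp only [List.length_append, List.length_cons, List.length_nil, List.nil_append, List.append_nil]; omega
        simp only [hm0, List.length_cons]
        omega
      · intro f s
        have heq : P ++ y :: (v :: V' ++ R) = (P ++ y :: v :: V') ++ R := by simp
        have := loopA_scanPrefix (P ++ y :: v :: V') R i (P.length + (v :: V').length) hQ
          (by simp only [List.length_cons]; omega)
          (by simp only [List.length_append, List.length_cons, List.length_nil, List.nil_append, List.append_nil]; omega) f s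
        rw [hm0, hins, heq]
        simpa using this
    · -- y > v: one move brings v to the front, then two sub-cascades
      simp only [List.cons_append]
      have hvy : v < y := lt_of_not_ge hyv
      have hPv : ∀ p ∈ P, p ≤ v := fun p hp => hPV p hp v List.mem_cons_self
      have hVle : ∀ u ∈ V', v ≤ u := hV.1
      have hinsPv : pvInsort P v = P ++ [v] := by
        simpa using pvInsort_middle P [] v hP hPv (by simp)
      -- first sub-cascade: insert v into P (measure strictly smaller)
      have hμ1 : (([] : List Int).length + P.length) * (([] : List Int).length + P.length + 1)
          + P.length < N := by
        have h1 : P.length * (P.length + 1) + P.length < (P.length + 1) * (P.length + 2) := by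
          nlinarith
        have h2 : (P.length + 1) * (P.length + 2) ≤
            (P.length + (V'.length + 1)) * (P.length + (V'.length + 1) + 1) :=
          Nat.mul_le_mul (by omega) (by omega)
        have h3 := hN
        simp only [List.length_cons] at h3
        simp only [List.length_nil, Nat.zero_add]
        omega
      obtain ⟨k₁, hk₁, hrun₁⟩ := ihN _ hμ1 [] P v (y :: (V' ++ R)) 0 le_rfl
        List.Pairwise.nil hP (by simp) (by simp) (by simp)
      simp only [List.nil_append, List.length_nil, Nat.zero_add] at hk₁ hrun₁
      -- second sub-cascade: carry y across V', with v now merged into the prefix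
      have hP₂sorted : (pvInsort P v).Pairwise (· ≤ ·) := pvInsort_sorted P v hP
      have hP₂len : (pvInsort P v).length = P.length + 1 := pvInsort_length P v
      have hP₂V : pvInsort P v ++ V' = P ++ v :: V' := by rw [hinsPv]; simp
      have hμ2 : ((pvInsort P v).length + V'.length) * ((pvInsort P v).length + V'.length + 1)
          + V'.length < N := by
        have h3 := hN
        simp only [List.length_cons] at h3
        rw [hP₂len, show P.length + 1 + V'.length = P.length + (V'.length + 1) by omega]
        omega
      obtain ⟨k₂, hk₂, hrun₂⟩ := ihN _ hμ2 (pvInsort P v) V' y R P.length le_rfl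
        hP₂sorted hV.2
        (by
          intro p hp
          rcases (mem_pvInsort P v p).mp hp with rfl | hp
          · exact le_of_lt hvy
          · exact hPy p hp)
        (by
          intro p hp u hu
          rcases (mem_pvInsort P v p).mp hp with rfl | hp
          · exact hVle u hu
          · exact hPV p hp u (List.mem_cons_of_mem _ hu))
        (by rw [hP₂len]; omega)
      rw [hP₂V] at hk₂ hrun₂
      -- the move count decomposes
      have hcv : cvN (P ++ v :: V') v = 1 + mval P v P := by
        rw [cvN_append_of_ge P (v :: V') v (by
          intro u hu
          rcases List.mem_cons.mp hu with rfl | hu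
          · exact le_rfl
          · exact hVle u hu)]
        exact (one_add_mval_self P v hP).symm
      have hmdec : mval (P ++ v :: V') y (v :: V')
          = (1 + mval P v P) + mval (P ++ v :: V') y V' := by
        rw [mval, List.filter_cons_of_pos (by simpa using hvy), List.map_cons, List.sum_cons, hcv]
        rfl
      refine ⟨(P.length - i) + 1 + k₁ + k₂, ?_, ?_⟩
      · -- fuel bound
        have hb : (2 * ((1 + mval P v P) + mval (P ++ v :: V') y V') + 1)
              * ((P ++ y :: v :: (V' ++ R)).length + 1)
            = (2 * mval P v P + 1) * ((P ++ y :: v :: (V' ++ R)).length + 1)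
              + (2 * mval (P ++ v :: V') y V' + 1) * ((P ++ y :: v :: (V' ++ R)).length + 1)
              + ((P ++ y :: v :: (V' ++ R)).length + 1) := by ring
        have hlen1 : (v :: (P ++ (y :: (V' ++ R)))).length = (P ++ y :: v :: (V' ++ R)).length := by
          simp only [List.length_append, List.length_cons, List.length_nil, List.nil_append, List.append_nil, pvInsort_length]; omega
        have hlen2 : (pvInsort P v ++ y :: (V' ++ R)).length = (P ++ y :: v :: (V' ++ R)).length := by
          simp only [List.length_append, List.length_cons, List.length_nil, List.nil_append, List.append_nil, pvInsort_length]; omega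
        have hnge : (P ++ y :: v :: (V' ++ R)).length = P.length + V'.length + R.length + 2 := by
          simp only [List.length_append, List.length_cons, List.length_nil, List.nil_append, List.append_nil, pvInsort_length]; omega
        rw [hlen1] at hk₁
        rw [hlen2] at hk₂
        rw [hmdec]
        omega
      · intro f s
        have hf : f + ((P.length - i) + 1 + k₁ + k₂) = ((f + k₂ + k₁) + 1) + (P.length - i) := by
          omega
        have hL1 : P ++ y :: v :: (V' ++ R) = (P ++ [y]) ++ (v :: (V' ++ R)) := by simp
        have c1 := loopA_scanPrefix (P ++ [y]) (v :: (V' ++ R)) i P.length hPy' hi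
          (by simp) (f + k₂ + k₁ + 1) s
        -- the move at position P.length
        have hgd1 : ((P ++ [y]) ++ (v :: (V' ++ R))).getD P.length 0 = y := by
          rw [List.getD_append _ _ _ _ (by simp)]
          rw [List.getD_append_right _ _ _ _ (by simp)]
          simp
        have hgd2 : ((P ++ [y]) ++ (v :: (V' ++ R))).getD (P.length + 1) 0 = v := by
          rw [List.getD_append_right _ _ _ _ (by simp)]
          simp
        have htake : ((P ++ [y]) ++ (v :: (V' ++ R))).take (P.length + 1) = P ++ [y] := by
          rw [List.take_left' (by simp)]
        have hdrop : ((P ++ [y]) ++ (v :: (V' ++ R))).drop (P.length + 2) = V' ++ R := by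
          have : (P ++ [y]) ++ (v :: (V' ++ R)) = (P ++ [y] ++ [v]) ++ (V' ++ R) := by simp
          rw [this, List.drop_left' (by simp only [List.length_append, List.length_cons, List.length_nil, List.nil_append, List.append_nil]; try omega)]
        have hmove := loopA_move (f + k₂ + k₁) ((P ++ [y]) ++ (v :: (V' ++ R))) P.length s
          (by simp only [List.length_append, List.length_cons, List.length_nil, List.nil_append, List.append_nil]; omega)
          (by rw [hgd1, hgd2]; exact hyv)
        rw [hgd2, htake, hdrop] at hmove
        have hshape : (v :: (P ++ [y] ++ (V' ++ R))) = v :: (P ++ (y :: (V' ++ R))) := by simp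
        rw [hshape] at hmove
        -- chain everything
        rw [hf, hL1, c1, hmove]
        have e1 := hrun₁ (f + k₂) (s + 1)
        rw [show (f + k₂) + k₁ = f + k₂ + k₁ from rfl] at e1
        rw [e1, hinsPv]
        have e2 := hrun₂ f ((s + 1) + (mval P v P : Int))
        rw [hinsPv] at e2
        have hpos : (P ++ [v]).length + V'.length = P.length + (v :: V').length := by
          simp only [List.length_append, List.length_cons, List.length_nil, List.nil_append, List.append_nil, pvInsort_length]; omega
        have hsteps : (((s + 1) + (mval P v P : Int)) + (mval (P ++ v :: V') y V' : Int))
            = s + (mval (P ++ v :: V') y (v :: V') : Int) := by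
          rw [hmdec]; push_cast; ring
        rw [hpos, hsteps] at e2
        exact e2
  -- every element of a sorted list is at most its last element
theorem mem_le_getLast (S : List Int) (hS : S.Pairwise (· ≤ ·)) (hne : S ≠ []) :
    ∀ p ∈ S, p ≤ S.getLast hne := by
  intro p hp
  obtain ⟨j, hj, rfl⟩ := List.mem_iff_getElem.mp hp
  rw [List.getLast_eq_getElem]
  rcases Nat.lt_or_ge j (S.length - 1) with h | h
  · exact List.pairwise_iff_getElem.mp hS j (S.length - 1) hj (by omega) h
  · have hj' : j = S.length - 1 := by omega
    subst hj'
    exact le_rfl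

-- the outer loop: from a sorted prefix S, the remaining steps are what pvGo computes
theorem topl (rest : List Int) : ∀ (S : List Int) (i : Nat),
    S.Pairwise (· ≤ ·) → S ≠ [] → i ≤ S.length - 1 →
    ∃ k M : Nat, k ≤ (2 * M + rest.length + 1) * ((S ++ rest).length + 1) + 1 ∧
      (M : Int) = pvGo rest S 0 ∧ M ≤ rest.length * 2 ^ (S ++ rest).length ∧
      ∀ (f : Nat) (s : Int), loopA (f + k) (S ++ rest) i s = some (s + M) := by
  induction rest with
  | nil =>
    intro S i hS hne hi
    have hlen : 1 ≤ S.length := List.length_pos_of_ne_nil hne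
    refine ⟨(S.length - 1 - i) + 1, 0, ?_, by simp [pvGo], Nat.zero_le _, ?_⟩
    · simp only [List.length_nil, List.append_nil]
      omega
    · intro f s
      have hscan := loopA_scanPrefix S [] i (S.length - 1) hS hi (by omega) (f + 1) s
      have hexit := loopA_exit f (S ++ []) (S.length - 1) s
        (by simp only [List.length_append, List.length_nil]; omega)
      rw [show f + ((S.length - 1 - i) + 1) = (f + 1) + (S.length - 1 - i) by omega,
        hscan, hexit]
      norm_num
  | cons x r' ih =>
    intro S i hS hne hi
    have hlen : 1 ≤ S.length := List.length_pos_of_ne_nil hne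
    have hlast : S.getLast? = some (S.getLast hne) := List.getLast?_eq_getLast hne
    have hgd1 : (S ++ x :: r').getD (S.length - 1) 0 = S.getLast hne := by
      rw [List.getD_append _ _ _ _ (by omega), List.getD_eq_getElem _ _ (by omega)]
      rw [List.getLast_eq_getElem]
    have hgd2 : (S ++ x :: r').getD S.length 0 = x := by
      rw [List.getD_append_right _ _ _ _ le_rfl]
      simp
    have hscan := loopA_scanPrefix S (x :: r') i (S.length - 1) hS hi (by omega)
    by_cases hle : S.getLast hne ≤ x
    · -- x extends the sorted prefix: no move
      have hSx : (S ++ [x]).Pairwise (· ≤ ·) := by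
        rw [List.pairwise_append]
        exact ⟨hS, List.pairwise_singleton _ _, fun p hp z hz => by
          rw [List.mem_singleton] at hz
          exact hz ▸ le_trans (mem_le_getLast S hS hne p hp) hle⟩
      obtain ⟨k', M', hk', hM', hMb', hrun'⟩ := ih (S ++ [x]) S.length hSx (by simp)
        (by simp only [List.length_append, List.length_cons, List.length_nil]; omega)
      have hassoc : S ++ x :: r' = (S ++ [x]) ++ r' := by simp
      have hlen2 : ((S ++ [x]) ++ r').length = (S ++ x :: r').length := by
        simp only [List.length_append, List.length_cons, List.length_nil, List.nil_append, List.append_nil, pvInsort_length]; omega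
      refine ⟨(S.length - 1 - i) + 1 + k', M', ?_, ?_, ?_, ?_⟩
      · rw [hlen2] at hk'
        have hb : (2 * M' + (x :: r').length + 1) * ((S ++ x :: r').length + 1)
            = (2 * M' + r'.length + 1) * ((S ++ x :: r').length + 1)
              + ((S ++ x :: r').length + 1) := by
          simp only [List.length_cons]; ring
        have hlen3 : (S ++ x :: r').length = S.length + r'.length + 1 := by
          simp only [List.length_append, List.length_cons, List.length_nil, List.nil_append, List.append_nil, pvInsort_length]; omega
        omega
      · have hgo : pvGo (x :: r') S 0
            = pvGo r' (pvInsort S x) (if x < S.getLast hne then 0 + pvStepsFor S x else 0) := by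
          rw [pvGo, hlast]
        have hins : pvInsort S x = S ++ [x] := by
          simpa using pvInsort_middle S [] x hS
            (fun p hp => le_trans (mem_le_getLast S hS hne p hp) hle) (by simp)
        rw [hgo, if_neg (not_lt.mpr hle), hins]
        exact hM'
      · rw [hlen2] at hMb'
        have : r'.length * 2 ^ (S ++ x :: r').length ≤ (x :: r').length * 2 ^ (S ++ x :: r').length :=
          Nat.mul_le_mul (by simp) le_rfl
        omega
      · intro f s
        have hadv := loopA_adv (f + k') (S ++ x :: r') (S.length - 1) s
          (by simp only [List.length_append, List.length_cons]; omega)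
          (by rw [show S.length - 1 + 1 = S.length by omega, hgd1, hgd2]; exact hle)
        rw [show f + ((S.length - 1 - i) + 1 + k') = ((f + k') + 1) + (S.length - 1 - i) by omega,
          hscan ((f + k') + 1) s, hadv, show S.length - 1 + 1 = S.length by omega]
        rw [hassoc]
        exact hrun' f s
    · -- x is out of order: move it to the front and cascade with lem2
      have hxl : x < S.getLast hne := lt_of_not_ge hle
      obtain ⟨k₂, hk₂, hrun₂⟩ := lem2
        ((([] : List Int).length + S.length) * (([] : List Int).length + S.length + 1) + S.length)
        [] S x r' 0 le_rfl List.Pairwise.nil hS (by simp) (by simp) (by simp)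
      simp only [List.nil_append, List.length_nil, Nat.zero_add] at hk₂ hrun₂
      have hinsne : pvInsort S x ≠ [] := by
        have := pvInsort_length S x
        intro hc
        rw [hc] at this
        simp at this
      obtain ⟨k', M', hk', hM', hMb', hrun'⟩ := ih (pvInsort S x) S.length
        (pvInsort_sorted S x hS) hinsne (by rw [pvInsort_length]; omega)
      have hcv : cvN S x = 1 + mval S x S := (one_add_mval_self S x hS).symm
      have hlen2 : (pvInsort S x ++ r').length = (S ++ x :: r').length := by
        simp only [List.length_append, List.length_cons, List.length_nil, List.nil_append, List.append_nil, pvInsort_length]; omega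
      have hlen4 : (x :: (S ++ r')).length = (S ++ x :: r').length := by
        simp only [List.length_append, List.length_cons, List.length_nil, List.nil_append, List.append_nil, pvInsort_length]; omega
      refine ⟨(S.length - 1 - i) + 1 + k₂ + k', cvN S x + M', ?_, ?_, ?_, ?_⟩
      · rw [hlen4] at hk₂
        rw [hlen2] at hk'
        have hb : (2 * (cvN S x + M') + (x :: r').length + 1) * ((S ++ x :: r').length + 1)
            = (2 * mval S x S + 1) * ((S ++ x :: r').length + 1)
              + (2 * M' + r'.length + 1) * ((S ++ x :: r').length + 1)
              + ((S ++ x :: r').length + 1) + ((S ++ x :: r').length + 1) := by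
          rw [hcv]
          simp only [List.length_cons]
          ring
        have hlen3 : (S ++ x :: r').length = S.length + r'.length + 1 := by
          simp only [List.length_append, List.length_cons, List.length_nil, List.nil_append, List.append_nil, pvInsort_length]; omega
        omega
      · have hgo : pvGo (x :: r') S 0
            = pvGo r' (pvInsort S x) (if x < S.getLast hne then 0 + pvStepsFor S x else 0) := by
          rw [pvGo, hlast]
        rw [hgo, if_pos hxl, pvGo_acc r' (pvInsort S x) (0 + pvStepsFor S x)]
        rw [← hM', pvStepsFor_eq_cvN]
        push_cast
        ring
      · have h2 : 2 ^ S.length ≤ 2 ^ (S ++ x :: r').length :=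
          Nat.pow_le_pow_right (by norm_num)
            (by simp only [List.length_append, List.length_cons]; omega)
        have h3 : (x :: r').length * 2 ^ (S ++ x :: r').length
            = r'.length * 2 ^ (S ++ x :: r').length + 2 ^ (S ++ x :: r').length := by
          simp only [List.length_cons]; ring
        have h4 := cvN_le_two_pow S x
        rw [hlen2] at hMb'
        omega
      · intro f s
        have htake : (S ++ x :: r').take S.length = S := List.take_left' rfl
        have hdrop : (S ++ x :: r').drop (S.length + 1) = r' := by
          rw [show S ++ x :: r' = (S ++ [x]) ++ r' by simp]
          rw [List.drop_left' (by simp)]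
        have hmove := loopA_move ((f + k') + k₂) (S ++ x :: r') (S.length - 1) s
          (by simp only [List.length_append, List.length_cons]; omega)
          (by rw [show S.length - 1 + 1 = S.length by omega, hgd1, hgd2]; exact hle)
        rw [show S.length - 1 + 1 = S.length by omega,
          show S.length - 1 + 2 = S.length + 1 by omega,
          hgd2, htake, hdrop] at hmove
        rw [show f + ((S.length - 1 - i) + 1 + k₂ + k') = (((f + k') + k₂) + 1) + (S.length - 1 - i) by omega,
          hscan (((f + k') + k₂) + 1) s, hmove, hrun₂ (f + k') (s + 1),
          hrun' f ((s + 1) + (mval S x S : Int))]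
        congr 1
        rw [hcv]
        push_cast
        ring

-- ===== VERDICT (by name: the statement is the Claim_ definition above) =====
theorem sortTime_spec : Claim_equal_sortTime := by
  unfold Claim_equal_sortTime Spec_sortTime
  intro L _
  cases L with
  | nil => decide
  | cons x tail =>
    obtain ⟨k, M, hk, hM, hMb, hrun⟩ := topl tail [x] 0
      (List.pairwise_singleton _ _) (by simp) (by simp)
    have hlen : ([x] ++ tail).length = tail.length + 1 := by simp
    rw [hlen] at hk hMb
    rw [show tail.length + 1 + 1 = tail.length + 2 by omega] at hk
    have hMb' : M ≤ (tail.length + 1) * 2 ^ (tail.length + 1) :=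
      le_trans hMb (Nat.mul_le_mul_right _ (by omega))
    have h1 : 2 * M + tail.length + 1
        ≤ 2 * ((tail.length + 1) * 2 ^ (tail.length + 1)) + tail.length + 2 := by omega
    have hA : pvFuel (x :: tail)
        = (2 * ((tail.length + 1) * 2 ^ (tail.length + 1)) + tail.length + 2) * (tail.length + 2) + 2 := by
      simp only [pvFuel, List.length_cons]
      ring
    have h2 : (2 * M + tail.length + 1) * (tail.length + 2)
        ≤ (2 * ((tail.length + 1) * 2 ^ (tail.length + 1)) + tail.length + 2) * (tail.length + 2) :=
      Nat.mul_le_mul_right _ h1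
    have hfuel : k ≤ pvFuel (x :: tail) := by omega
    have hrun' := hrun (pvFuel (x :: tail) - k) 0
    rw [show pvFuel (x :: tail) - k + k = pvFuel (x :: tail) by omega] at hrun'
    rw [List.singleton_append] at hrun'
    rw [sortTime, hrun']
    have halt : sortTime_alt (x :: tail) = pvGo tail [x] 0 := by
      rw [sortTime_alt, pvGo]
      rfl
    rw [halt, ← hM]
    simp
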